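-- pv_equiv track=rewrite | github.com/nikzavadskiy/prog-instruments-labs | lab_1/fixed.py | find_in_square
-- ===== SOURCE A (Python) =====
-- polybius_square = [
--     ['a', 'b', 'c', 'd', 'e'],
--     ['f', 'g', 'h', 'i', 'k'],
--     ['l', 'm', 'n', 'o', 'p'],
--     ['q', 'r', 's', 't', 'u'],
--     ['v', 'w', 'x', 'y', 'z']
-- ]
--
-- def find_in_square(ch):
--     """
--     Find coordinates of a character in the Polybius square.
--     """
--     if ch == 'j':
--         ch = 'i'
--     for i in range(5):
--         for j in range(5):
--             if polybius_square[i][j] == ch: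
--                 return i + 1, j + 1
--     return None, None
-- ===== SOURCE B (Python) =====
-- def find_in_square(ch):
--     """
--     Find coordinates of a character in the Polybius square
--     via a closed-form index computation (no scan of the square).
--     """
--     if ch == 'j':
--         ch = 'i'
--     if len(ch) == 1 and 'a' <= ch <= 'z':
--         idx = ord(ch) - 97 if ord(ch) < 106 else ord(ch) - 98
--         return idx // 5 + 1, idx % 5 + 1
--     return None, None
-- ===== Notes on version B (the rewrite author's own statement) =====
-- stated objective: simpler
-- what changed: Replaces the nested 5x5 scan of the Polybius square with a closed-form computation of the coordinates from the character code (with an offset past the omitted 'j'), guarded by a single-lowercase-letter check.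
import Mathlib
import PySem

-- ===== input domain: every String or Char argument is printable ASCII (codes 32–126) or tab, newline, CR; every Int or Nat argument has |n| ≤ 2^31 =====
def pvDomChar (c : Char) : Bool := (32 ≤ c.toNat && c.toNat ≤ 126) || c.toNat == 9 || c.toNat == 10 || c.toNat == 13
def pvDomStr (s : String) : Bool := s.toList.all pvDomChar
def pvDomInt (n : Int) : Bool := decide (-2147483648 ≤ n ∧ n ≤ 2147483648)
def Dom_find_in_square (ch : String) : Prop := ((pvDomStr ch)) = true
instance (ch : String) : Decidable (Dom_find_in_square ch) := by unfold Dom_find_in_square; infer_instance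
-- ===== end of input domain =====

-- B replaces A's nested 5x5 scan of the Polybius square with a closed-form
-- coordinate computation from the character code; objective: simpler.

-- ===== PORT A =====
def polybiusSquare : List (List String) :=
  [["a","b","c","d","e"],
   ["f","g","h","i","k"],
   ["l","m","n","o","p"],
   ["q","r","s","t","u"],
   ["v","w","x","y","z"]]

-- inner 'for j in range(5)': some coords on match, none = loop fell through
def fisLoopJ (ch : String) (i : Nat) : List Nat → Option (Int × Int)
  | [] => none
  | j :: js =>
    if (polybiusSquare.getD i []).getD j "" = ch then some ((i : Int) + 1, (j : Int) + 1)
    else fisLoopJ ch i js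

-- outer 'for i in range(5)'
def fisLoopI (ch : String) : List Nat → Option Int × Option Int
  | [] => (none, none)
  | i :: is =>
    match fisLoopJ ch i [0, 1, 2, 3, 4] with
    | some (a, b) => (some a, some b)
    | none => fisLoopI ch is

def find_in_square (ch : String) : Option Int × Option Int :=
  let c := if ch = "j" then "i" else ch
  fisLoopI c [0, 1, 2, 3, 4]

-- ===== PORT B =====
-- closed-form body of Source B after the j→i remap:
-- len(ch) == 1 and 'a' <= ch <= 'z' (single-char string comparison = Char comparison)
def fisClosed (s : String) : Option Int × Option Int :=
  match s.toList with
  | [c1] =>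
    if 'a' ≤ c1 ∧ c1 ≤ 'z' then
      let idx : Int := if c1.toNat < 106 then (c1.toNat : Int) - 97 else (c1.toNat : Int) - 98
      (some (PySem.Int.floordiv idx 5 + 1), some (PySem.Int.mod idx 5 + 1))
    else (none, none)
  | _ => (none, none)

def find_in_square_alt (ch : String) : Option Int × Option Int :=
  fisClosed (if ch = "j" then "i" else ch)

-- ===== PRECONDITION & SPEC =====
def Spec_find_in_square (ch : String) (out : Option Int × Option Int) : Prop := out = find_in_square_alt ch
instance (ch : String) (out : Option Int × Option Int) : Decidable (Spec_find_in_square ch out) := by unfold Spec_find_in_square; infer_instance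

-- ===== CLAIM (what is proved, stated in full; the proofs are below) =====
def Claim_equal_find_in_square : Prop := ∀ (ch : String), Dom_find_in_square ch → Spec_find_in_square ch (find_in_square ch)

-- ===== LEMMAS AND PROOFS =====

theorem char_le_iff (a b : Char) : a ≤ b ↔ a.toNat ≤ b.toNat := by
  rw [Char.le_def]; exact UInt32.le_iff_toNat_le

theorem char_eq_iff (a b : Char) : a = b ↔ a.toNat = b.toNat := by
  constructor
  · rintro rfl; rfl
  · intro h; exact Char.ext (UInt32.toNat_inj.mp h)

-- the scan and the closed form agree on every string other than "j" (the remapped input)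
theorem key (s : String) (hs : s ≠ "j") : fisLoopI s [0,1,2,3,4] = fisClosed s := by
  obtain ⟨l, rfl⟩ : ∃ l, s = String.ofList l := ⟨s.toList, String.ofList_toList.symm⟩
  have hs' : l ≠ ['j'] := by intro h; subst h; exact hs (by decide)
  match l with
  | [] => decide
  | c1 :: c2 :: rest =>
    simp [fisLoopI, fisLoopJ, polybiusSquare, fisClosed, ← String.toList_inj]
  | [c1] =>
    have hj : c1 ≠ 'j' := by intro h; exact hs' (by simp [h])
    by_cases hm : c1 ∈ ['a','b','c','d','e','f','g','h','i','k','l','m','n','o','p','q','r','s','t','u','v','w','x','y','z']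
    · fin_cases hm <;> decide
    · simp only [List.mem_cons, List.not_mem_nil, or_false, not_or] at hm
      obtain ⟨ha,hb,hc,hd,he,hf,hg,hh,hi,hk,hl,hm2,hn,ho,hp,hq,hr,hs2,ht,hu,hv,hw,hx,hy,hz⟩ := hm
      have conv : ∀ (x : Char) (n : Nat), x.toNat = n → c1 ≠ x → c1.toNat ≠ n := by
        rintro x n rfl hne h; exact hne ((char_eq_iff _ _).mpr h)
      have hcond : ¬('a' ≤ c1 ∧ c1 ≤ 'z') := by
        rintro ⟨h1, h2⟩
        rw [char_le_iff] at h1 h2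
        have b1 : 97 ≤ c1.toNat := h1
        have b2 : c1.toNat ≤ 122 := h2
        have := conv 'a' 97 rfl ha; have := conv 'b' 98 rfl hb
        have := conv 'c' 99 rfl hc; have := conv 'd' 100 rfl hd
        have := conv 'e' 101 rfl he; have := conv 'f' 102 rfl hf
        have := conv 'g' 103 rfl hg; have := conv 'h' 104 rfl hh
        have := conv 'i' 105 rfl hi; have := conv 'j' 106 rfl hj
        have := conv 'k' 107 rfl hk; have := conv 'l' 108 rfl hl
        have := conv 'm' 109 rfl hm2; have := conv 'n' 110 rfl hn
        have := conv 'o' 111 rfl ho; have := conv 'p' 112 rfl hp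
        have := conv 'q' 113 rfl hq; have := conv 'r' 114 rfl hr
        have := conv 's' 115 rfl hs2; have := conv 't' 116 rfl ht
        have := conv 'u' 117 rfl hu; have := conv 'v' 118 rfl hv
        have := conv 'w' 119 rfl hw; have := conv 'x' 120 rfl hx
        have := conv 'y' 121 rfl hy; have := conv 'z' 122 rfl hz
        omega
      simp [fisLoopI, fisLoopJ, polybiusSquare, fisClosed, ← String.toList_inj, hcond,
        Ne.symm ha, Ne.symm hb, Ne.symm hc, Ne.symm hd, Ne.symm he, Ne.symm hf, Ne.symm hg,
        Ne.symm hh, Ne.symm hi, Ne.symm hk, Ne.symm hl, Ne.symm hm2, Ne.symm hn, Ne.symm ho,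
        Ne.symm hp, Ne.symm hq, Ne.symm hr, Ne.symm hs2, Ne.symm ht, Ne.symm hu, Ne.symm hv,
        Ne.symm hw, Ne.symm hx, Ne.symm hy, Ne.symm hz]

theorem fis_agree (ch : String) : find_in_square ch = find_in_square_alt ch := by
  unfold find_in_square find_in_square_alt
  by_cases h : ch = "j"
  · simp only [h]; exact key "i" (by decide)
  · simp only [if_neg h]; exact key ch h

-- ===== VERDICT (by name: the statement is the Claim_ definition above) =====
theorem find_in_square_spec : Claim_equal_find_in_square := by
  intro ch _
  exact fis_agree ch
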